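-- pv_equiv track=rewrite | github.com/bhaveshsooka/advent-of-code | python/aoc2015/Day11.py | increasingStraight
-- ===== SOURCE A (Python) =====
-- alphabetMap = {chr(i + ord('a')): i for i in range(26)}
--
-- def increasingStraight(password: str) -> bool:
--   if len(password) <= 2:
--     return False
--   [first, second, third], tail = password[:3], password[3:]
--   if (alphabetMap[first] + 1 == alphabetMap[second] and
--           alphabetMap[second] + 1 == alphabetMap[third]):
--     return True
--   return increasingStraight(password[1:])
-- ===== SOURCE B (Python) =====
-- def increasingStraight(password: str) -> bool:
--     return any(ord(a) + 1 == ord(b) and ord(b) + 1 == ord(c)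
--                for a, b, c in zip(password, password[1:], password[2:]))
-- ===== Notes on version B (the rewrite author's own statement) =====
-- stated objective: faster
-- what changed: Replaced the O(n^2) recursion (each step slices the string and looks characters up in a dict) by a single linear any() over the zipped triples of consecutive characters compared via ord.
-- outside the precondition, e.g. on increasingStraight('aaX'): A returns False, B returns False
import Mathlib
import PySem

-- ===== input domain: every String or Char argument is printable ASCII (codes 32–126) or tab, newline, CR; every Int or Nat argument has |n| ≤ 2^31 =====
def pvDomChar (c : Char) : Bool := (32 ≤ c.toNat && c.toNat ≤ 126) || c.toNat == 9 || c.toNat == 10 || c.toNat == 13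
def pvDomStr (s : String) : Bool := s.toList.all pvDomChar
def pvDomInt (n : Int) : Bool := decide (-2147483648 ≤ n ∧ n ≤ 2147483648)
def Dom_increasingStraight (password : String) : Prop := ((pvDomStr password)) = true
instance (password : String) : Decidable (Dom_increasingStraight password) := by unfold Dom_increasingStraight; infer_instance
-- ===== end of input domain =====

-- B replaces A's O(n^2) dict-lookup recursion (string sliced at every step) by one linear
-- any() over the zipped consecutive character triples compared via ord; on inputs where A
-- raises KeyError (a non-lowercase character reached before a straight, excluded by Pre_)
-- B simply returns the plain answer.


-- ===== PORT A =====
-- alphabetMap = {chr(i + ord('a')): i for i in range(26)}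
def alphabetMap : PySem.Dict Char Int :=
  (PySem.List.pyRange 0 26 1).foldl
    (fun d i => d.insert (Char.ofNat (i + 97).toNat) i) PySem.Dict.empty

-- alphabetMap[c]; KeyError = none is excluded by Pre_, so the default is never reached there
def alphaVal (c : Char) : Int := (alphabetMap.get? c).getD (-1)

-- A's recursion over the characters: the catch-all arm is `len(password) <= 2: return False`,
-- the three-way pattern is `[first, second, third] = password[:3]`, `rest` is password[1:]
def goA : List Char → Bool
  | a :: rest@(b :: c :: _) =>
      if alphaVal a + 1 == alphaVal b && alphaVal b + 1 == alphaVal c then true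
      else goA rest
  | _ => false

def increasingStraight (password : String) : Bool := goA password.toList

-- ===== PORT B =====
-- any(ord(a)+1 == ord(b) and ord(b)+1 == ord(c) for a, b, c in zip(s, s[1:], s[2:]))
def altL (l : List Char) : Bool :=
  ((l.zip l.tail).zip l.tail.tail).any
    (fun t => t.1.1.toNat + 1 == t.1.2.toNat && t.1.2.toNat + 1 == t.2.toNat)

def increasingStraight_alt (password : String) : Bool := altL password.toList

-- ===== PRECONDITION & SPEC =====
-- c is one of 'a'..'z' (the keys of alphabetMap)
def lowerChar (c : Char) : Bool := 97 ≤ c.toNat && c.toNat ≤ 122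

-- head triple of l is an increasing straight (used by Pre_ to locate the straight A finds)
def straight3 : List Char → Bool
  | a :: b :: c :: _ => a.toNat + 1 == b.toNat && b.toNat + 1 == c.toNat
  | _ => false

-- Pre_ excludes the inputs where A raises KeyError on a non-lowercase character: it admits
-- strings of length <= 2, all-lowercase strings, and strings with an increasing straight at
-- position j whose first j+3 characters are all lowercase (A returns True there before any
-- bad lookup).  It also excludes a few inputs A still returns on, where only `and`'s
-- short-circuit saves the scan from the bad lookup (e.g. "aaX": the third character is
-- never looked up and A returns False, as does B).
def Pre_increasingStraight (password : String) : Prop :=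
  password.toList.length ≤ 2 ∨
  password.toList.all lowerChar = true ∨
  (∃ j < password.toList.length,
     (password.toList.take (j + 3)).all lowerChar = true ∧
     straight3 (password.toList.drop j) = true)
instance (password : String) : Decidable (Pre_increasingStraight password) := by
  unfold Pre_increasingStraight; infer_instance

def pvWitness_increasingStraight : String := "hijklmmn"

def Spec_increasingStraight (password : String) (out : Bool) : Prop := out = increasingStraight_alt password
instance (password : String) (out : Bool) : Decidable (Spec_increasingStraight password out) := by unfold Spec_increasingStraight; infer_instance

-- ===== CLAIM (what is proved, stated in full; the proofs are below) =====
def Claim_equal_increasingStraight : Prop := ∀ (password : String), Dom_increasingStraight password → Pre_increasingStraight password → Spec_increasingStraight password (increasingStraight password)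

-- ===== LEMMAS AND PROOFS =====

-- the dict lookup on a lowercase character
lemma alpha_get (c : Char) (h : lowerChar c = true) :
    alphabetMap.get? c = some ((c.toNat : Int) - 97) := by
  simp only [lowerChar, Bool.and_eq_true, decide_eq_true_eq] at h
  obtain ⟨hlo, hhi⟩ := h
  have hc : Char.ofNat c.toNat = c := Char.ofNat_toNat c
  rw [← hc]
  generalize c.toNat = n at hlo hhi ⊢
  interval_cases n <;> decide

lemma cond_eq (a b c : Char)
    (ha : lowerChar a = true) (hb : lowerChar b = true) (hc : lowerChar c = true) :
    (alphaVal a + 1 == alphaVal b && alphaVal b + 1 == alphaVal c) =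
      (a.toNat + 1 == b.toNat && b.toNat + 1 == c.toNat) := by
  simp only [alphaVal, alpha_get a ha, alpha_get b hb, alpha_get c hc, Option.getD_some]
  rw [Bool.eq_iff_iff]
  simp only [Bool.and_eq_true, beq_iff_eq]
  omega

lemma altL_cons (a b c : Char) (r : List Char) :
    altL (a :: b :: c :: r) =
      ((a.toNat + 1 == b.toNat && b.toNat + 1 == c.toNat) || altL (b :: c :: r)) := by
  simp [altL]

lemma main_lemma (l : List Char)
    (h : l.length ≤ 2 ∨ l.all lowerChar = true ∨
         (∃ j < l.length, (l.take (j + 3)).all lowerChar = true ∧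
            straight3 (l.drop j) = true)) :
    goA l = altL l := by
  induction l with
  | nil => simp [goA, altL]
  | cons a t ih =>
    match t with
    | [] => simp [goA, altL]
    | [b] => simp [goA, altL]
    | b :: c :: r =>
      -- the head characters are lowercase in every admissible case
      have hlow : lowerChar a = true ∧ lowerChar b = true ∧ lowerChar c = true := by
        rcases h with h | h | ⟨j, _, hpre, _⟩
        · simp at h
        · simp only [List.all_cons, Bool.and_eq_true] at h
          exact ⟨h.1, h.2.1, h.2.2.1⟩
        · rw [show j + 3 = ((j + 2) + 1) by omega, List.take_succ_cons,
              show j + 2 = ((j + 1) + 1) by omega, List.take_succ_cons,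
              List.take_succ_cons] at hpre
          simp only [List.all_cons, Bool.and_eq_true] at hpre
          exact ⟨hpre.1, hpre.2.1, hpre.2.2.1⟩
      obtain ⟨ha, hb, hc⟩ := hlow
      rw [altL_cons]
      simp only [goA]
      rw [cond_eq a b c ha hb hc]
      by_cases hs : (a.toNat + 1 == b.toNat && b.toNat + 1 == c.toNat) = true
      · simp [hs]
      · rw [Bool.not_eq_true] at hs
        simp only [hs, Bool.false_or]
        apply ih
        rcases h with h | h | ⟨j, hj, hpre, hst⟩
        · simp at h
        · refine Or.inr (Or.inl ?_)
          simp only [List.all_cons, Bool.and_eq_true] at h ⊢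
          exact h.2
        · right; right
          match j, hj with
          | 0, _ =>
            exfalso
            simp only [List.drop_zero, straight3] at hst
            rw [hs] at hst
            exact Bool.false_ne_true hst
          | (k+1), hj =>
            refine ⟨k, ?_, ?_, ?_⟩
            · simp only [List.length_cons] at hj ⊢; omega
            · rw [show k + 1 + 3 = ((k + 3) + 1) by omega, List.take_succ_cons] at hpre
              simp only [List.all_cons, Bool.and_eq_true] at hpre
              exact hpre.2
            · rw [List.drop_succ_cons] at hst
              exact hst

-- ===== VERDICT (by name: the statement is the Claim_ definition above) =====
theorem increasingStraight_spec : Claim_equal_increasingStraight := by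
  intro password _ hpre
  show goA password.toList = altL password.toList
  exact main_lemma password.toList hpre
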